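-- pv_equiv track=rewrite | github.com/gugolple/advent_of_code | 2020/day/14/p2.py | mp_to_pos
-- ===== SOURCE A (Python) =====
-- def mp_to_pos(inp: str):
--     as_list = list(inp)
--     res = [as_list[:]]
--     for i, v in enumerate(as_list):
--         if v == 'X':
--             tm = len(res)
--             for ti in range(tm):
--                 lt = res[ti]
--                 tlt = lt[:]
--                 lt[i] = '0'
--                 tlt[i] = '1'
--                 res.append(tlt)
--     return [''.join(i) for i in res]
-- ===== SOURCE B (Python) =====
-- def mp_to_pos(inp: str):
--     cs = list(inp)
--     xs = [i for i, c in enumerate(cs) if c == 'X']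
--     res = []
--     for n in range(2 ** len(xs)):
--         t = cs[:]
--         for j, p in enumerate(xs):
--             t[p] = str((n >> j) & 1)
--         res.append(''.join(t))
--     return res
-- ===== Notes on version B (the rewrite author's own statement) =====
-- stated objective: alternative
-- what changed: Replaces the iterative list-doubling with in-place mutation by direct bitmask enumeration: the X-positions are collected once and each of the 2^k outputs is built directly from the counter's bits (first X = least-significant bit).
import Mathlib
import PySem

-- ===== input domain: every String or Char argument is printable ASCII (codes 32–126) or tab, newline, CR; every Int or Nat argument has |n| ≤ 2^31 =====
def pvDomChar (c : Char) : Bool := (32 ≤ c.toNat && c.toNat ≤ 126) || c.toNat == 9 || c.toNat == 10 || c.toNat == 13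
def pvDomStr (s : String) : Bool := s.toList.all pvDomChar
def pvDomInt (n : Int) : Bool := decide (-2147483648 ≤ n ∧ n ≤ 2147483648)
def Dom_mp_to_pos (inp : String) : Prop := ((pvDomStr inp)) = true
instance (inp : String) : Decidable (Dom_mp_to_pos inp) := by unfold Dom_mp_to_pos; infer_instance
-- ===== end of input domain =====

-- B replaces A's iterative list-doubling with in-place mutation by direct bitmask
-- enumeration over the precomputed X-position index (alternative decomposition, same cost).

-- ===== PORT A =====
-- Literal transliteration of A: res starts as [list(inp)]; for each 'X' at index i the
-- inner loop over range(len(res)) mutates res[ti] (setting position i to '0') and appends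
-- the '1'-copy at the end; finally each char list is joined.  The Python in-place
-- mutation `lt[i]='0'` + `res.append(tlt)` is rendered as `res.set ti … ++ […]`.
def mp_to_pos (inp : String) : List String :=
  let as_list := inp.toList
  let res0 : List (List Char) := [as_list]
  let res := (PySem.List.enumerate as_list 0).foldl (fun res iv =>
    if iv.2 = 'X' then
      let tm := res.length
      (List.range tm).foldl (fun r ti =>
        let lt := r.getD ti []
        let tlt := lt
        (r.set ti (lt.set iv.1.toNat '0')) ++ [tlt.set iv.1.toNat '1']) res
    else res) res0
  res.map fun l => String.mk l

-- ===== PORT B =====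
-- Literal transliteration of Source B: xs = indices of 'X' (enumerate indices are ≥ 0, so
-- .toNat is exact); for n in range(2**len(xs)) set position xs[j] to bit (n >> j) & 1.
def mp_to_pos_alt (inp : String) : List String :=
  let cs := inp.toList
  let xs := (PySem.List.enumerate cs 0).filterMap
    (fun p => if p.2 = 'X' then some p.1.toNat else none)
  (List.range (2 ^ xs.length)).map (fun n =>
    String.mk ((PySem.List.enumerate xs 0).foldl
      (fun t jp => t.set jp.2 (if (n >>> jp.1.toNat) % 2 = 1 then '1' else '0')) cs))

-- ===== PRECONDITION & SPEC =====
def Spec_mp_to_pos (inp : String) (out : List String) : Prop := out = mp_to_pos_alt inp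
instance (inp : String) (out : List String) : Decidable (Spec_mp_to_pos inp out) := by unfold Spec_mp_to_pos; infer_instance

-- ===== CLAIM (what is proved, stated in full; the proofs are below) =====
def Claim_equal_mp_to_pos : Prop := ∀ (inp : String), Dom_mp_to_pos inp → Spec_mp_to_pos inp (mp_to_pos inp)

-- ===== LEMMAS AND PROOFS =====

-- the character '0'/'1' chosen from a bit
def pvBitc (n : Nat) : Char := if n % 2 = 1 then '1' else '0'

-- canonical "assign the bits of n to the X positions xs" function, LSB first
def pvBuild (cs : List Char) (xs : List Nat) (n : Nat) : List Char :=
  match xs with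
  | [] => cs
  | p :: ps => pvBuild (cs.set p (pvBitc n)) ps (n / 2)

-- the positions of 'X' in l, counted from offset s
def pvXpos (l : List Char) (s : Nat) : List Nat :=
  match l with
  | [] => []
  | c :: cs => if c = 'X' then s :: pvXpos cs (s + 1) else pvXpos cs (s + 1)

-- one doubling step of A
def pvDouble (i : Nat) (res : List (List Char)) : List (List Char) :=
  res.map (fun l => l.set i '0') ++ res.map (fun l => l.set i '1')

theorem pvBuild_mod (xs : List Nat) (cs : List Char) (n t : Nat) :
    pvBuild cs xs (n + 2 ^ xs.length * t) = pvBuild cs xs n := by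
  induction xs generalizing cs n t with
  | nil => rfl
  | cons p ps ih =>
    simp only [pvBuild, List.length_cons, pow_succ]
    have e : 2 ^ ps.length * 2 * t = 2 * (2 ^ ps.length * t) := by ring
    rw [e]
    have h1 : (n + 2 * (2 ^ ps.length * t)) % 2 = n % 2 := by omega
    have h2 : (n + 2 * (2 ^ ps.length * t)) / 2 = n / 2 + 2 ^ ps.length * t := by omega
    rw [pvBitc, h1, h2, ← pvBitc, ih]

theorem pvBuild_append (xs : List Nat) (p : Nat) (cs : List Char) (n : Nat) :
    pvBuild cs (xs ++ [p]) n = (pvBuild cs xs n).set p (pvBitc (n / 2 ^ xs.length)) := by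
  induction xs generalizing cs n with
  | nil => simp [pvBuild]
  | cons q qs ih =>
    simp only [List.cons_append, pvBuild, ih, List.length_cons]
    congr 2
    rw [Nat.div_div_eq_div_mul, pow_succ']

-- A's inner loop equals one doubling step (generalized invariant)
theorem pvInner (i : Nat) (todo done : List (List Char)) :
    (List.range' done.length todo.length).foldl (fun r ti =>
        (r.set ti ((r.getD ti []).set i '0')) ++ [(r.getD ti []).set i '1'])
      (done.map (fun l => l.set i '0') ++ todo ++ done.map (fun l => l.set i '1'))
    = (done ++ todo).map (fun l => l.set i '0') ++ (done ++ todo).map (fun l => l.set i '1') := by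
  induction todo generalizing done with
  | nil => simp
  | cons t ts ih =>
    simp only [List.length_cons, List.range'_succ, List.foldl_cons]
    have hget : ((done.map (fun l => l.set i '0') ++ (t :: ts) ++ done.map (fun l => l.set i '1')).getD done.length []) = t := by
      rw [List.getD_eq_getElem?_getD]
      rw [List.append_assoc, List.getElem?_append_right (by simp)]
      simp
    have hset : ((done.map (fun l => l.set i '0') ++ (t :: ts) ++ done.map (fun l => l.set i '1')).set done.length (t.set i '0'))
        = done.map (fun l => l.set i '0') ++ (t.set i '0' :: ts) ++ done.map (fun l => l.set i '1') := by
      rw [List.append_assoc, List.set_append_right _ _ (by simp), List.append_assoc]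
      simp
    rw [hget, hset]
    have hre : done.map (fun l => l.set i '0') ++ (t.set i '0' :: ts) ++ done.map (fun l => l.set i '1') ++ [t.set i '1']
        = (done ++ [t]).map (fun l => l.set i '0') ++ ts ++ (done ++ [t]).map (fun l => l.set i '1') := by
      simp
    have hlen : done.length + 1 = (done ++ [t]).length := by simp
    calc (List.range' (done.length + 1) ts.length).foldl _ _
        = ((done ++ [t]) ++ ts).map (fun l => l.set i '0') ++ ((done ++ [t]) ++ ts).map (fun l => l.set i '1') := by
          rw [hre, hlen]; exact ih (done ++ [t])
      _ = _ := by simp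

theorem pvInner0 (i : Nat) (res : List (List Char)) :
    (List.range res.length).foldl (fun r ti =>
        (r.set ti ((r.getD ti []).set i '0')) ++ [(r.getD ti []).set i '1']) res
    = pvDouble i res := by
  have := pvInner i res []
  simpa [pvDouble, List.range_eq_range'] using this

-- A's main fold equals folding pvDouble over the X positions
theorem pvMain (l : List Char) (s : Nat) (res : List (List Char)) :
    (PySem.List.enumerate l (s : Int)).foldl (fun res iv =>
      if iv.2 = 'X' then
        (List.range res.length).foldl (fun r ti =>
          (r.set ti ((r.getD ti []).set iv.1.toNat '0')) ++ [(r.getD ti []).set iv.1.toNat '1']) res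
      else res) res
    = (pvXpos l s).foldl (fun r i => pvDouble i r) res := by
  induction l generalizing s res with
  | nil => simp [PySem.List.enumerate_nil, pvXpos]
  | cons c cs ih =>
    rw [PySem.List.enumerate_cons, List.foldl_cons]
    by_cases hc : c = 'X'
    · simp only [hc, pvXpos]
      rw [pvInner0, show ((s : Int) + 1) = ((s + 1 : Nat) : Int) by push_cast; ring, ih]
      simp
    · simp only [pvXpos, hc]
      rw [show ((s : Int) + 1) = ((s + 1 : Nat) : Int) by push_cast; ring, ih]
      simp

-- folding pvDouble over xs starting from [cs] enumerates all bit assignments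
theorem pvDoubleFold (xs : List Nat) (cs : List Char) :
    xs.foldl (fun r i => pvDouble i r) [cs]
    = (List.range (2 ^ xs.length)).map (pvBuild cs xs) := by
  induction xs using List.reverseRecOn with
  | nil => simp [pvBuild]
  | append_singleton xs p ih =>
    rw [List.foldl_append, List.foldl_cons, List.foldl_nil, ih]
    have hm : 2 ^ (xs ++ [p]).length = 2 ^ xs.length + 2 ^ xs.length := by
      simp [pow_succ]; ring
    rw [pvDouble, hm, List.range_add, List.map_append, List.map_map, List.map_map, List.map_map]
    congr 1
    · apply List.map_congr_left
      intro n hn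
      rw [List.mem_range] at hn
      simp only [Function.comp]
      rw [pvBuild_append, Nat.div_eq_of_lt hn]
      rfl
    · apply List.map_congr_left
      intro n hn
      rw [List.mem_range] at hn
      simp only [Function.comp]
      rw [pvBuild_append]
      have h1 : pvBuild cs xs (2 ^ xs.length + n) = pvBuild cs xs n := by
        have := pvBuild_mod xs cs n 1
        simpa [Nat.add_comm] using this
      have h2 : (2 ^ xs.length + n) / 2 ^ xs.length = 1 := by
        rw [Nat.add_comm, Nat.add_div_right _ (by positivity), Nat.div_eq_of_lt hn]
      rw [h1, h2]
      rfl

-- B's inner fold computes pvBuild (with shift offset s)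
theorem pvAltInner (xs : List Nat) (cs : List Char) (n s : Nat) :
    (PySem.List.enumerate xs (s : Int)).foldl
      (fun t jp => t.set jp.2 (if (n >>> jp.1.toNat) % 2 = 1 then '1' else '0')) cs
    = pvBuild cs xs (n >>> s) := by
  induction xs generalizing cs s with
  | nil => simp [PySem.List.enumerate_nil, pvBuild]
  | cons p ps ih =>
    rw [PySem.List.enumerate_cons, List.foldl_cons]
    rw [show ((s : Int) + 1) = ((s + 1 : Nat) : Int) by push_cast; ring, ih]
    simp only [pvBuild, Int.toNat_natCast, pvBitc, Nat.shiftRight_succ]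
    rfl

-- B's xs equals pvXpos
theorem pvXsEq (l : List Char) (s : Nat) :
    (PySem.List.enumerate l (s : Int)).filterMap
      (fun p => if p.2 = 'X' then some p.1.toNat else none)
    = pvXpos l s := by
  induction l generalizing s with
  | nil => simp [PySem.List.enumerate_nil, pvXpos]
  | cons c cs ih =>
    rw [PySem.List.enumerate_cons, List.filterMap_cons]
    by_cases hc : c = 'X'
    · simp only [hc, pvXpos]
      rw [show ((s : Int) + 1) = ((s + 1 : Nat) : Int) by push_cast; ring, ih]
      simp
    · simp only [pvXpos, hc]
      rw [show ((s : Int) + 1) = ((s + 1 : Nat) : Int) by push_cast; ring, ih]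
      simp

-- ===== VERDICT (by name: the statement is the Claim_ definition above) =====
theorem mp_to_pos_spec : Claim_equal_mp_to_pos := by
  intro inp _
  unfold Spec_mp_to_pos mp_to_pos mp_to_pos_alt
  simp only
  rw [show ((0 : Int)) = ((0 : Nat) : Int) from rfl]
  rw [pvMain, pvDoubleFold, pvXsEq, List.map_map]
  apply List.map_congr_left
  intro n hn
  rw [pvAltInner]
  simp [Nat.shiftRight_zero]
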